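-- pv_equiv track=rewrite | github.com/AdamZhouSE/pythonHomework | Code/CodeRecords/2855/60797/289993.py | find
-- ===== SOURCE A (Python) =====
-- def find(n, data):
--     re = 'YES'
--     for i in range(n):
--         for j in range(n):
--             tmp = 0
--             if i!=0:
--                 if data[i-1][j]=='o':
--                     tmp += 1
--             if j!=0:
--                 if data[i][j-1]=='o':
--                     tmp += 1
--             if j!=n-1:
--                 if data[i][j+1]=='o':
--                     tmp += 1
--             if i!=n-1:
--                 if data[i+1][j]=='o':
--                     tmp += 1
--             if tmp%2!=0:
--                 re = 'NO'
--     return re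
-- ===== SOURCE B (Python) =====
-- def find(n, data):
--     counts = [[0] * n for _ in range(n)]
--     for i in range(n):
--         for j in range(n):
--             if data[i][j] == 'o':
--                 if i > 0:
--                     counts[i - 1][j] += 1
--                 if i < n - 1:
--                     counts[i + 1][j] += 1
--                 if j > 0:
--                     counts[i][j - 1] += 1
--                 if j < n - 1:
--                     counts[i][j + 1] += 1
--     return 'NO' if any(v % 2 != 0 for row in counts for v in row) else 'YES'
-- ===== Notes on version B (the rewrite author's own statement) =====
-- stated objective: alternative
-- what changed: B replaces A's gather pass (each cell inspecting its four neighbors) with a scatter pass: every 'o' cell increments a counts grid at its in-bounds neighbors, then a separate scan checks the counts for odd parity.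
-- outside the precondition, e.g. on find(1, []): A returns 'YES', B raises IndexError
import Mathlib
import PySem

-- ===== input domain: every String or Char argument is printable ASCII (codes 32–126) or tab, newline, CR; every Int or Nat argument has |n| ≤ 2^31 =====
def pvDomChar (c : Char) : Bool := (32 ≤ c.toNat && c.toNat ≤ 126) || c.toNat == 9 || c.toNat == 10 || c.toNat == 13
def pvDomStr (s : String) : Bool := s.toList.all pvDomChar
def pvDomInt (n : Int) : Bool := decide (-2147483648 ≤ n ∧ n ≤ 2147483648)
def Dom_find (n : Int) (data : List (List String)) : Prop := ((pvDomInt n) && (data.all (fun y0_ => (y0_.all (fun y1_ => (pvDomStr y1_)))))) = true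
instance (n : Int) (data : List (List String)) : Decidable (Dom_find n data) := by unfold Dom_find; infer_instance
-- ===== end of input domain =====

-- B replaces A's gather pass (each cell counting its 'o' neighbors) with a scatter pass over a
-- counts grid plus a separate parity scan: an alternative decomposition of the same O(n^2) job.

-- data[i][j], total with a default; exact under Pre_find (the indices used are then in range and nonnegative)
def pvCell (data : List (List String)) (i j : Int) : String :=
  PySem.List.pyGetD (PySem.List.pyGetD data i []) j ""

-- ===== PORT A =====
def find (n : Int) (data : List (List String)) : String :=
  (PySem.List.pyRange 0 n 1).foldl (fun re i =>
    (PySem.List.pyRange 0 n 1).foldl (fun re j =>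
      let tmp : Int := 0
      let tmp := if i ≠ 0 then (if pvCell data (i-1) j = "o" then tmp + 1 else tmp) else tmp
      let tmp := if j ≠ 0 then (if pvCell data i (j-1) = "o" then tmp + 1 else tmp) else tmp
      let tmp := if j ≠ n - 1 then (if pvCell data i (j+1) = "o" then tmp + 1 else tmp) else tmp
      let tmp := if i ≠ n - 1 then (if pvCell data (i+1) j = "o" then tmp + 1 else tmp) else tmp
      if tmp % 2 ≠ 0 then "NO" else re) re) "YES"

-- ===== PORT B =====
-- counts[i][j] += 1; the .toNat is exact here: pvBump is only applied to indices the guards have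
-- checked to be ≥ 0 and < n, so no clamping (and no Python negative wraparound) can occur.
def pvBump (c : List (List Int)) (i j : Int) : List (List Int) :=
  c.modify i.toNat (fun row => row.modify j.toNat (· + 1))

def find_alt (n : Int) (data : List (List String)) : String :=
  let counts := (PySem.List.pyRange 0 n 1).foldl (fun c i =>
    (PySem.List.pyRange 0 n 1).foldl (fun c j =>
      if pvCell data i j = "o" then
        let c := if 0 < i then pvBump c (i-1) j else c
        let c := if i < n - 1 then pvBump c (i+1) j else c
        let c := if 0 < j then pvBump c i (j-1) else c
        let c := if j < n - 1 then pvBump c i (j+1) else c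
        c
      else c) c)
    ((PySem.List.pyRange 0 n 1).map (fun _ => List.replicate n.toNat (0 : Int)))
  if counts.any (fun row => row.any (fun v => v % 2 ≠ 0)) then "NO" else "YES"

-- ===== PRECONDITION & SPEC =====
-- Pre_find: the grid must really be n×n (in its first n rows/columns) whenever n ≥ 1.  For n ≥ 2 this is
-- exactly where A returns without an IndexError.  For n = 1 A reads nothing and returns 'YES' even on a
-- too-small grid, while B (naturally) reads the single cell and would raise there; those degenerate
-- n = 1 inputs with a grid smaller than 1×1 are excluded.
def Pre_find (n : Int) (data : List (List String)) : Prop :=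
  0 < n → (n ≤ (data.length : Int) ∧ ∀ row ∈ data.take n.toNat, n ≤ (row.length : Int))
instance (n : Int) (data : List (List String)) : Decidable (Pre_find n data) := by
  unfold Pre_find; infer_instance

def pvWitness_find : Int × List (List String) := (2, [["o", "."], [".", "o"]])

def Spec_find (n : Int) (data : List (List String)) (out : String) : Prop := out = find_alt n data
instance (n : Int) (data : List (List String)) (out : String) : Decidable (Spec_find n data out) := by
  unfold Spec_find; infer_instance

-- ===== CLAIM (what is proved, stated in full; the proofs are below) =====
def Claim_equal_find : Prop := ∀ (n : Int) (data : List (List String)), Dom_find n data → Pre_find n data → Spec_find n data (find n data)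

-- ===== LEMMAS AND PROOFS =====

-- the value A's inner body computes for cell (i,j) (same let-chain, so the port's body is defeq to it)
def tmpA (n : Int) (data : List (List String)) (i j : Int) : Int :=
  let tmp : Int := 0
  let tmp := if i ≠ 0 then (if pvCell data (i-1) j = "o" then tmp + 1 else tmp) else tmp
  let tmp := if j ≠ 0 then (if pvCell data i (j-1) = "o" then tmp + 1 else tmp) else tmp
  let tmp := if j ≠ n - 1 then (if pvCell data i (j+1) = "o" then tmp + 1 else tmp) else tmp
  let tmp := if i ≠ n - 1 then (if pvCell data (i+1) j = "o" then tmp + 1 else tmp) else tmp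
  tmp

lemma tmpA_eq (n : Int) (data : List (List String)) (i j : Int) :
    tmpA n data i j =
      (if i ≠ 0 ∧ pvCell data (i-1) j = "o" then 1 else 0)
    + (if j ≠ 0 ∧ pvCell data i (j-1) = "o" then 1 else 0)
    + (if j ≠ n - 1 ∧ pvCell data i (j+1) = "o" then 1 else 0)
    + (if i ≠ n - 1 ∧ pvCell data (i+1) j = "o" then 1 else 0) := by
  have ifstep : ∀ (g c : Prop) [Decidable g] [Decidable c] (t : Int),
      (if g then (if c then t + 1 else t) else t) = t + (if g ∧ c then 1 else 0) := by
    intro g c _ _ t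
    by_cases hg : g <;> by_cases hc : c <;> simp [hg, hc]
  unfold tmpA
  simp only [ifstep, zero_add]
  by_cases h : i ≠ 0 <;> by_cases hc : pvCell data (i-1) j = "o" <;> simp [h, hc]

-- a foldl that only ever overwrites the accumulator with "NO"
lemma flagFold {α : Type} (p : α → Prop) [DecidablePred p] (l : List α) (r : String) :
    l.foldl (fun re x => if p x then "NO" else re) r
      = if l.any (fun x => decide (p x)) then "NO" else r := by
  induction l generalizing r with
  | nil => simp
  | cons x xs ih => by_cases h : p x <;> simp [h, ih]

lemma flagFold2 (p : Int → Int → Prop) [∀ i j, Decidable (p i j)] (l1 l2 : List Int)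
    (r : String) :
    l1.foldl (fun re i => l2.foldl (fun re j => if p i j then "NO" else re) re) r
      = if l1.any (fun i => l2.any (fun j => decide (p i j))) then "NO" else r := by
  induction l1 generalizing r with
  | nil => simp
  | cons x xs ih =>
    rw [List.foldl_cons, flagFold (p x) l2 r, ih]
    by_cases h : l2.any (fun j => decide (p x j)) = true <;> simp [h]

lemma find_eq_any (n : Int) (data : List (List String)) :
    find n data =
      if (PySem.List.pyRange 0 n 1).any (fun i => (PySem.List.pyRange 0 n 1).any
          (fun j => decide (tmpA n data i j % 2 ≠ 0))) then "NO" else "YES" :=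
  flagFold2 (fun i j => tmpA n data i j % 2 ≠ 0) _ _ _

-- ----- B-side: characterising the scatter pass -----

def Shape (n : Int) (c : List (List Int)) : Prop :=
  c.length = n.toNat ∧ ∀ row ∈ c, row.length = n.toNat

def getE (c : List (List Int)) (a b : Nat) : Int := (c.getD a []).getD b 0

def contrib (n : Int) (data : List (List String)) (i j : Int) (a b : Nat) : Int :=
  if pvCell data i j = "o" then
      (if 0 < i ∧ (a : Int) = i - 1 ∧ (b : Int) = j then 1 else 0)
    + (if i < n - 1 ∧ (a : Int) = i + 1 ∧ (b : Int) = j then 1 else 0)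
    + (if 0 < j ∧ (a : Int) = i ∧ (b : Int) = j - 1 then 1 else 0)
    + (if j < n - 1 ∧ (a : Int) = i ∧ (b : Int) = j + 1 then 1 else 0)
  else 0

lemma shape_bump {n : Int} {cg : List (List Int)} (h : Shape n cg) (i j : Int) :
    Shape n (pvBump cg i j) := by
  obtain ⟨hl, hr⟩ := h
  refine ⟨by simp [pvBump, hl], ?_⟩
  intro row hrow
  rw [List.mem_iff_getElem?] at hrow
  obtain ⟨k, hk⟩ := hrow
  rw [pvBump, List.getElem?_modify] at hk
  cases hck : (cg[k]?) with
  | none => simp [hck] at hk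
  | some r =>
    have hrmem : r ∈ cg := List.mem_of_getElem? hck
    have hrl := hr r hrmem
    rw [hck] at hk
    simp only [Option.map_eq_map, Option.map_some, Option.some.injEq] at hk
    by_cases hik : i.toNat = k
    · rw [if_pos hik] at hk
      rw [← hk]
      simp [List.length_modify, hrl]
    · rw [if_neg hik] at hk
      rw [← hk]; exact hrl

lemma getE_bump {n : Int} {cg : List (List Int)} (h : Shape n cg) {i j : Int}
    (hi0 : 0 ≤ i) (hin : i < n) (hj0 : 0 ≤ j) (hjn : j < n) (a b : Nat) :
    getE (pvBump cg i j) a b = getE cg a b + (if (a : Int) = i ∧ (b : Int) = j then 1 else 0) := by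
  obtain ⟨hl, hr⟩ := h
  unfold pvBump getE
  simp only [List.getD_eq_getElem?_getD, List.getElem?_modify]
  by_cases hA : i.toNat = a
  · have hal : a < cg.length := by omega
    have hsome : (cg[a]?) = some (cg[a]'hal) := List.getElem?_eq_getElem hal
    rw [hsome]
    simp only [Option.map_eq_map, Option.map_some, if_pos hA, Option.getD_some]
    have hrowlen : cg[a].length = n.toNat := hr _ (List.getElem_mem hal)
    rw [List.getElem?_modify]
    by_cases hB : j.toNat = b
    · have hbl : b < cg[a].length := by omega
      have hsb : cg[a][b]? = some cg[a][b] := List.getElem?_eq_getElem hbl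
      rw [hsb]
      simp only [Option.map_eq_map, Option.map_some, if_pos hB, Option.getD_some]
      rw [if_pos ⟨by omega, by omega⟩]
    · have hne : ¬((a : Int) = i ∧ (b : Int) = j) := by omega
      rw [if_neg hne]
      cases hsb : (cg[a][b]?) with
      | none => simp
      | some v => simp [hB]
  · have hsome : (fun x => if i.toNat = a then (fun row => row.modify j.toNat (· + 1)) x else x) <$> cg[a]? = cg[a]? := by
      cases cg[a]? <;> simp [hA]
    rw [hsome, if_neg (by intro hcon; omega)]
    simp

-- the inner body of find_alt's scatter loop
def stepB (n : Int) (data : List (List String)) (c : List (List Int)) (i j : Int) :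
    List (List Int) :=
  if pvCell data i j = "o" then
    let c := if 0 < i then pvBump c (i-1) j else c
    let c := if i < n - 1 then pvBump c (i+1) j else c
    let c := if 0 < j then pvBump c i (j-1) else c
    let c := if j < n - 1 then pvBump c i (j+1) else c
    c
  else c

lemma stepB_shape {n : Int} {c : List (List Int)} (h : Shape n c)
    (data : List (List String)) (i j : Int) : Shape n (stepB n data c i j) := by
  unfold stepB
  split_ifs <;> first | exact h | (repeat' apply shape_bump) <;> exact h

lemma shape_cbump {n : Int} {c : List (List Int)} (h : Shape n c) (g : Prop) [Decidable g]
    (i j : Int) : Shape n (if g then pvBump c i j else c) := by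
  split_ifs
  · exact shape_bump h i j
  · exact h

lemma getE_cbump {n : Int} {c : List (List Int)} (h : Shape n c) (g : Prop) [Decidable g]
    {i j : Int} (hg : g → 0 ≤ i ∧ i < n ∧ 0 ≤ j ∧ j < n) (a b : Nat) :
    getE (if g then pvBump c i j else c) a b
      = getE c a b + (if g ∧ (a : Int) = i ∧ (b : Int) = j then 1 else 0) := by
  by_cases hgg : g
  · obtain ⟨h1, h2, h3, h4⟩ := hg hgg
    rw [if_pos hgg, getE_bump h h1 h2 h3 h4 a b]
    by_cases hab : (a : Int) = i ∧ (b : Int) = j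
    · rw [if_pos hab, if_pos ⟨hgg, hab⟩]
    · rw [if_neg hab, if_neg (by tauto)]
  · rw [if_neg hgg, if_neg (by tauto)]
    ring

lemma getE_stepB {n : Int} {c : List (List Int)} (h : Shape n c)
    (data : List (List String)) {i j : Int}
    (hi0 : 0 ≤ i) (hin : i < n) (hj0 : 0 ≤ j) (hjn : j < n) (a b : Nat) :
    getE (stepB n data c i j) a b = getE c a b + contrib n data i j a b := by
  by_cases ho : pvCell data i j = "o"
  · have s1 := shape_cbump h (0 < i) (i-1) j
    have s2 := shape_cbump s1 (i < n - 1) (i+1) j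
    have s3 := shape_cbump s2 (0 < j) i (j-1)
    rw [stepB, if_pos ho]
    rw [getE_cbump s3 (j < n - 1) (fun hgg => ⟨hi0, hin, by omega, by omega⟩) a b]
    rw [getE_cbump s2 (0 < j) (fun hgg => ⟨hi0, hin, by omega, by omega⟩) a b]
    rw [getE_cbump s1 (i < n - 1) (fun hgg => ⟨by omega, by omega, hj0, hjn⟩) a b]
    rw [getE_cbump h (0 < i) (fun hgg => ⟨by omega, by omega, hj0, hjn⟩) a b]
    rw [contrib, if_pos ho]
    ring
  · rw [stepB, if_neg ho, contrib, if_neg ho]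
    ring

lemma scatter_inner {n : Int} (data : List (List String)) (i : Int)
    (hi0 : 0 ≤ i) (hin : i < n) (js : List Int) (hjs : ∀ j ∈ js, 0 ≤ j ∧ j < n)
    {c : List (List Int)} (hc : Shape n c) :
    Shape n (js.foldl (fun c j => stepB n data c i j) c) ∧
    ∀ a b : Nat, getE (js.foldl (fun c j => stepB n data c i j) c) a b
      = getE c a b + (js.map (fun j => contrib n data i j a b)).sum := by
  induction js generalizing c with
  | nil => exact ⟨hc, by simp⟩
  | cons x xs ih =>
    have hx := hjs x (by simp)
    have hstep := stepB_shape hc data i x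
    obtain ⟨s1, s2⟩ := ih (fun j hj => hjs j (by simp [hj])) hstep
    refine ⟨s1, fun a b => ?_⟩
    simp only [List.foldl_cons, List.map_cons, List.sum_cons, s2 a b,
      getE_stepB hc data hi0 hin hx.1 hx.2 a b]
    ring

lemma scatter_all {n : Int} (data : List (List String)) (is : List Int)
    (his : ∀ i ∈ is, 0 ≤ i ∧ i < n) (js : List Int) (hjs : ∀ j ∈ js, 0 ≤ j ∧ j < n)
    {c : List (List Int)} (hc : Shape n c) :
    Shape n (is.foldl (fun c i => js.foldl (fun c j => stepB n data c i j) c) c) ∧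
    ∀ a b : Nat, getE (is.foldl (fun c i => js.foldl (fun c j => stepB n data c i j) c) c) a b
      = getE c a b + (is.map (fun i => (js.map (fun j => contrib n data i j a b)).sum)).sum := by
  induction is generalizing c with
  | nil => exact ⟨hc, by simp⟩
  | cons x xs ih =>
    have hx := his x (by simp)
    obtain ⟨t1, t2⟩ := scatter_inner data x hx.1 hx.2 js hjs hc
    obtain ⟨s1, s2⟩ := ih (fun i hi => his i (by simp [hi])) t1
    refine ⟨s1, fun a b => ?_⟩
    simp only [List.foldl_cons, List.map_cons, List.sum_cons, s2 a b, t2 a b]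
    ring

-- sum of a 0/1 indicator that forces its argument to a single target value
lemma sum_ite_target (l : List Int) (hl : l.Nodup) (t : Int) (P : Int → Prop)
    [DecidablePred P] (hP : ∀ x, P x → x = t) :
    (l.map (fun x => if P x then (1 : Int) else 0)).sum = if t ∈ l ∧ P t then 1 else 0 := by
  induction l with
  | nil => simp
  | cons x xs ih =>
    have hnd := hl.of_cons
    by_cases hx : P x
    · have hxt := hP x hx
      subst hxt
      have hnx : x ∉ xs := (List.nodup_cons.mp hl).1
      have hz : (xs.map (fun y => if P y then (1 : Int) else 0)).sum = 0 := by
        rw [List.sum_eq_zero]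
        intro v hv
        simp only [List.mem_map] at hv
        obtain ⟨y, hy, hveq⟩ := hv
        by_cases hPy : P y
        · exact absurd (hP y hPy ▸ hy) hnx
        · simp [hPy] at hveq; omega
      simp [hx, hz]
    · have : (t ∈ x :: xs ∧ P t) ↔ (t ∈ xs ∧ P t) := by
        constructor
        · rintro ⟨hm, hPt⟩
          rcases List.mem_cons.mp hm with h | h
          · exact absurd (h ▸ hPt) hx
          · exact ⟨h, hPt⟩
        · rintro ⟨hm, hPt⟩; exact ⟨List.mem_cons_of_mem _ hm, hPt⟩
      simp only [List.map_cons, List.sum_cons, if_neg hx, zero_add, ih hnd, this]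

lemma total_eq_tmpA {n : Int} (hn : 0 < n) (data : List (List String)) (a b : Nat)
    (ha : (a : Int) < n) (hb : (b : Int) < n) :
    ((PySem.List.pyRange 0 n 1).map (fun i =>
       ((PySem.List.pyRange 0 n 1).map (fun j => contrib n data i j a b)).sum)).sum
      = tmpA n data a b := by
  have hnd : (PySem.List.pyRange 0 n 1).Nodup := PySem.List.nodup_pyRange_one 0 n
  have hsplit : ∀ i j : Int, contrib n data i j a b =
      ((if pvCell data i j = "o" ∧ 0 < i ∧ (a:Int) = i - 1 ∧ (b:Int) = j then (1:Int) else 0)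
     + (if pvCell data i j = "o" ∧ i < n - 1 ∧ (a:Int) = i + 1 ∧ (b:Int) = j then 1 else 0))
     + ((if pvCell data i j = "o" ∧ 0 < j ∧ (a:Int) = i ∧ (b:Int) = j - 1 then 1 else 0)
     + (if pvCell data i j = "o" ∧ j < n - 1 ∧ (a:Int) = i ∧ (b:Int) = j + 1 then 1 else 0)) := by
    intro i j
    unfold contrib
    by_cases ho : pvCell data i j = "o" <;> simp [ho] <;> ring
  simp only [hsplit]
  simp only [PySem.List.sum_map_add_int]
  have hib : ((b:Int)) ∈ PySem.List.pyRange 0 n 1 := PySem.List.mem_pyRange_one.mpr ⟨by omega, hb⟩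
  have h1 : ∀ i : Int,
      ((PySem.List.pyRange 0 n 1).map (fun j =>
        if pvCell data i j = "o" ∧ 0 < i ∧ (a:Int) = i - 1 ∧ (b:Int) = j then (1:Int) else 0)).sum
      = if pvCell data i (b:Int) = "o" ∧ 0 < i ∧ (a:Int) = i - 1 then 1 else 0 := by
    intro i
    rw [sum_ite_target _ hnd ((b:Int)) _ (fun x hx => hx.2.2.2.symm)]
    refine if_congr ?_ rfl rfl
    constructor
    · rintro ⟨_, hc, hp, hai, _⟩; exact ⟨hc, hp, hai⟩
    · rintro ⟨hc, hp, hai⟩; exact ⟨hib, hc, hp, hai, rfl⟩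
  have h2 : ∀ i : Int,
      ((PySem.List.pyRange 0 n 1).map (fun j =>
        if pvCell data i j = "o" ∧ i < n - 1 ∧ (a:Int) = i + 1 ∧ (b:Int) = j then (1:Int) else 0)).sum
      = if pvCell data i (b:Int) = "o" ∧ i < n - 1 ∧ (a:Int) = i + 1 then 1 else 0 := by
    intro i
    rw [sum_ite_target _ hnd ((b:Int)) _ (fun x hx => hx.2.2.2.symm)]
    refine if_congr ?_ rfl rfl
    constructor
    · rintro ⟨_, hc, hp, hai, _⟩; exact ⟨hc, hp, hai⟩
    · rintro ⟨hc, hp, hai⟩; exact ⟨hib, hc, hp, hai, rfl⟩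
  have h3 : ∀ i : Int,
      ((PySem.List.pyRange 0 n 1).map (fun j =>
        if pvCell data i j = "o" ∧ 0 < j ∧ (a:Int) = i ∧ (b:Int) = j - 1 then (1:Int) else 0)).sum
      = if (b:Int) ≠ n - 1 ∧ pvCell data i ((b:Int) + 1) = "o" ∧ (a:Int) = i then 1 else 0 := by
    intro i
    rw [sum_ite_target _ hnd ((b:Int) + 1) _ (fun x hx => by have := hx.2.2.2; omega)]
    refine if_congr ?_ rfl rfl
    rw [PySem.List.mem_pyRange_one]
    constructor
    · rintro ⟨⟨_, hlt⟩, hc, _, hai, _⟩; exact ⟨by omega, hc, hai⟩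
    · rintro ⟨hlt, hc, hai⟩; exact ⟨⟨by omega, by omega⟩, hc, by omega, hai, by omega⟩
  have h4 : ∀ i : Int,
      ((PySem.List.pyRange 0 n 1).map (fun j =>
        if pvCell data i j = "o" ∧ j < n - 1 ∧ (a:Int) = i ∧ (b:Int) = j + 1 then (1:Int) else 0)).sum
      = if (b:Int) ≠ 0 ∧ pvCell data i ((b:Int) - 1) = "o" ∧ (a:Int) = i then 1 else 0 := by
    intro i
    rw [sum_ite_target _ hnd ((b:Int) - 1) _ (fun x hx => by have := hx.2.2.2; omega)]
    refine if_congr ?_ rfl rfl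
    rw [PySem.List.mem_pyRange_one]
    constructor
    · rintro ⟨⟨hge, _⟩, hc, _, hai, _⟩; exact ⟨by omega, hc, hai⟩
    · rintro ⟨hne, hc, hai⟩; exact ⟨⟨by omega, by omega⟩, hc, by omega, hai, by omega⟩
  simp only [h1, h2, h3, h4]
  have H1 : ((PySem.List.pyRange 0 n 1).map (fun i =>
      if pvCell data i (b:Int) = "o" ∧ 0 < i ∧ (a:Int) = i - 1 then (1:Int) else 0)).sum
      = if (a:Int) ≠ n - 1 ∧ pvCell data ((a:Int) + 1) (b:Int) = "o" then 1 else 0 := by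
    rw [sum_ite_target _ hnd ((a:Int) + 1) _ (fun x hx => by have := hx.2.2; omega)]
    refine if_congr ?_ rfl rfl
    rw [PySem.List.mem_pyRange_one]
    constructor
    · rintro ⟨⟨_, hlt⟩, hc, _, _⟩; exact ⟨by omega, hc⟩
    · rintro ⟨hne, hc⟩; exact ⟨⟨by omega, by omega⟩, hc, by omega, by omega⟩
  have H2 : ((PySem.List.pyRange 0 n 1).map (fun i =>
      if pvCell data i (b:Int) = "o" ∧ i < n - 1 ∧ (a:Int) = i + 1 then (1:Int) else 0)).sum
      = if (a:Int) ≠ 0 ∧ pvCell data ((a:Int) - 1) (b:Int) = "o" then 1 else 0 := by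
    rw [sum_ite_target _ hnd ((a:Int) - 1) _ (fun x hx => by have := hx.2.2; omega)]
    refine if_congr ?_ rfl rfl
    rw [PySem.List.mem_pyRange_one]
    constructor
    · rintro ⟨⟨hge, _⟩, hc, _, _⟩; exact ⟨by omega, hc⟩
    · rintro ⟨hne, hc⟩; exact ⟨⟨by omega, by omega⟩, hc, by omega, by omega⟩
  have H3 : ((PySem.List.pyRange 0 n 1).map (fun i =>
      if (b:Int) ≠ n - 1 ∧ pvCell data i ((b:Int) + 1) = "o" ∧ (a:Int) = i then (1:Int) else 0)).sum
      = if (b:Int) ≠ n - 1 ∧ pvCell data (a:Int) ((b:Int) + 1) = "o" then 1 else 0 := by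
    rw [sum_ite_target _ hnd ((a:Int)) _ (fun x hx => hx.2.2.symm)]
    refine if_congr ?_ rfl rfl
    rw [PySem.List.mem_pyRange_one]
    constructor
    · rintro ⟨_, hne, hc, _⟩; exact ⟨hne, hc⟩
    · rintro ⟨hne, hc⟩; exact ⟨⟨by omega, by omega⟩, hne, hc, rfl⟩
  have H4 : ((PySem.List.pyRange 0 n 1).map (fun i =>
      if (b:Int) ≠ 0 ∧ pvCell data i ((b:Int) - 1) = "o" ∧ (a:Int) = i then (1:Int) else 0)).sum
      = if (b:Int) ≠ 0 ∧ pvCell data (a:Int) ((b:Int) - 1) = "o" then 1 else 0 := by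
    rw [sum_ite_target _ hnd ((a:Int)) _ (fun x hx => hx.2.2.symm)]
    refine if_congr ?_ rfl rfl
    rw [PySem.List.mem_pyRange_one]
    constructor
    · rintro ⟨_, hne, hc, _⟩; exact ⟨hne, hc⟩
    · rintro ⟨hne, hc⟩; exact ⟨⟨by omega, by omega⟩, hne, hc, rfl⟩
  rw [H1, H2, H3, H4, tmpA_eq]
  ring

-- ----- assembling both sides -----

lemma find_alt_eq (n : Int) (data : List (List String)) :
    find_alt n data =
      if ((PySem.List.pyRange 0 n 1).foldl (fun c i => (PySem.List.pyRange 0 n 1).foldl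
            (fun c j => stepB n data c i j) c)
          ((PySem.List.pyRange 0 n 1).map (fun _ => List.replicate n.toNat (0 : Int)))).any
        (fun row => row.any (fun v => v % 2 ≠ 0)) then "NO" else "YES" := by
  rfl

lemma getE_eq_getElem (cnt : List (List Int)) (a b : Nat) (h1 : a < cnt.length)
    (h2 : b < (cnt[a]'h1).length) : getE cnt a b = (cnt[a]'h1)[b]'h2 := by
  unfold getE
  rw [List.getD_eq_getElem cnt [] h1, List.getD_eq_getElem _ 0 h2]

theorem find_eq_find_alt (n : Int) (data : List (List String)) : find n data = find_alt n data := by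
  by_cases hn : n ≤ 0
  · have hnil : PySem.List.pyRange 0 n 1 = [] := PySem.List.pyRange_one_eq_nil (by omega)
    rw [find_eq_any, find_alt_eq, hnil]
    simp
  · have hn' : 0 < n := by omega
    rw [find_eq_any, find_alt_eq]
    have hbounds : ∀ x ∈ PySem.List.pyRange 0 n 1, 0 ≤ x ∧ x < n := by
      intro x hx
      have := PySem.List.mem_pyRange_one.mp hx
      omega
    have hc0 : Shape n ((PySem.List.pyRange 0 n 1).map (fun _ => List.replicate n.toNat (0:Int))) := by
      constructor
      · simp [PySem.List.length_pyRange_one]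
      · intro row hrow
        simp only [List.mem_map] at hrow
        obtain ⟨_, _, hre⟩ := hrow
        simp [← hre]
    set C := (PySem.List.pyRange 0 n 1).foldl (fun c i => (PySem.List.pyRange 0 n 1).foldl
        (fun c j => stepB n data c i j) c)
      ((PySem.List.pyRange 0 n 1).map (fun _ => List.replicate n.toNat (0 : Int))) with hC
    obtain ⟨hshape, hget⟩ := scatter_all data (PySem.List.pyRange 0 n 1) hbounds
      (PySem.List.pyRange 0 n 1) hbounds hc0
    rw [← hC] at hshape hget
    have hzero : ∀ a b : Nat,
        getE ((PySem.List.pyRange 0 n 1).map (fun _ => List.replicate n.toNat (0:Int))) a b = 0 := by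
      intro a b
      unfold getE
      rcases lt_or_ge a ((PySem.List.pyRange 0 n 1).map
          (fun _ => List.replicate n.toNat (0:Int))).length with hlt | hge
      · rw [List.getD_eq_getElem _ _ hlt]
        simp only [List.getElem_map]
        rcases lt_or_ge b n.toNat with hb | hb
        · rw [List.getD_eq_getElem _ _ (by simpa using hb)]
          simp
        · rw [List.getD_eq_default _ _ (by simpa using hb)]
      · rw [List.getD_eq_default _ _ hge]
        simp
    have hval : ∀ a b : Nat, a < n.toNat → b < n.toNat →
        getE C a b = tmpA n data a b := by
      intro a b ha hb
      rw [hget a b, hzero a b, zero_add]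
      exact total_eq_tmpA hn' data a b (by omega) (by omega)
    have hcond : ((PySem.List.pyRange 0 n 1).any (fun i => (PySem.List.pyRange 0 n 1).any
          (fun j => decide (tmpA n data i j % 2 ≠ 0))))
        = (C.any (fun row => row.any (fun v => decide (v % 2 ≠ 0)))) := by
      rw [Bool.eq_iff_iff]
      simp only [List.any_eq_true, decide_eq_true_eq]
      constructor
      · rintro ⟨i, hi, j, hj, hodd⟩
        obtain ⟨hi0, hin⟩ := hbounds i hi
        obtain ⟨hj0, hjn⟩ := hbounds j hj
        have hal : i.toNat < C.length := by rw [hshape.1]; omega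
        have hrowmem : C[i.toNat]'hal ∈ C := List.getElem_mem hal
        have hrowlen : (C[i.toNat]'hal).length = n.toNat := hshape.2 _ hrowmem
        have hbl : j.toNat < (C[i.toNat]'hal).length := by rw [hrowlen]; omega
        refine ⟨C[i.toNat]'hal, hrowmem, (C[i.toNat]'hal)[j.toNat]'hbl, List.getElem_mem hbl, ?_⟩
        rw [← getE_eq_getElem C i.toNat j.toNat hal hbl, hval i.toNat j.toNat (by omega) (by omega)]
        rwa [Int.toNat_of_nonneg hi0, Int.toNat_of_nonneg hj0]
      · rintro ⟨row, hrow, v, hv, hodd⟩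
        obtain ⟨a, ha, hae⟩ := List.mem_iff_getElem.mp hrow
        obtain ⟨b, hbb, hbe⟩ := List.mem_iff_getElem.mp hv
        have ha' : a < n.toNat := by rw [← hshape.1]; exact ha
        have hb' : b < n.toNat := by
          have := hshape.2 row hrow
          omega
        refine ⟨(a : Int), PySem.List.mem_pyRange_one.mpr ⟨by omega, by omega⟩,
          (b : Int), PySem.List.mem_pyRange_one.mpr ⟨by omega, by omega⟩, ?_⟩
        have hble : b < (C[a]'ha).length := by rw [hae]; exact hbb
        rw [← hval a b ha' hb', getE_eq_getElem C a b ha hble]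
        have : (C[a]'ha)[b]'hble = v := by
          subst hae
          exact hbe
        rw [this]
        exact hodd
    rw [hcond]

-- ===== VERDICT (by name: the statement is the Claim_ definition above) =====
theorem find_spec : Claim_equal_find := by
  intro n data _ _
  unfold Spec_find
  exact find_eq_find_alt n data
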